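-- pv_equiv track=rewrite | github.com/raeez/chiral-bar-cobar | compute/lib/cy_modular_k3e_engine.py | phi_m21_fourier
-- ===== SOURCE A (Python) =====
-- from typing import Any, Dict, List, Optional, Tuple
--
-- def phi_m21_fourier(nmax: int = 20) -> Dict[Tuple[int, int], int]:
--     r"""Fourier coefficients of phi_{-2,1}(tau, z) = sum c(n,l) q^n y^l.
--
--     phi_{-2,1} = -theta_1(tau, z)^2 / eta(tau)^6.
--
--     This is the unique weak Jacobi form of weight -2, index 1.
--     phi_{-2,1}(tau, z) = (y - 2 + y^{-1}) + (-2y^2 + 8y - 12 + 8y^{-1} - 2y^{-2})q + ...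
--
--     Fourier coefficients c(n, l) depend only on D = 4n - l^2.
--     c(-1) = -1, c(0) = -2, c(3) = 8, c(4) = -12, c(7) = 39, c(8) = -56, ...
--
--     At z=0: phi_{-2,1}(tau, 0) = 0 identically (the prefactor (y-2+y^{-1})
--     vanishes at y=1).
--     """
--     # phi_{-2,1} discriminant coefficients
--     # c(D) for phi_{-2,1}: known from Eichler-Zagier
--     # The relation: phi_{0,1} = 12 * phi_{-2,1}' + E_2 * phi_{-2,1}
--     # is NOT what we use. Instead, direct computation.
--     #
--     # phi_{-2,1}(tau, z) = -(y^{1/2} - y^{-1/2})^2 * prod(stuff) / eta^6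
--     # = (y - 2 + y^{-1}) * sum a_n q^n (up to signs and normalizations)
--     #
--     # The Fourier coefficients satisfy c(n, l) = c_D(4n - l^2) where:
--     # EZ convention: phi_{-2,1} = -theta_1^2 / eta^6.
--     # At q^0: (y - 2 + y^{-1}), so c(0, +/-1) = 1, c(0, 0) = -2.
--     # Therefore c(-1) = 1 (NOT -1), c(0) = -2.
--     #
--     # VERIFICATION of phi_{-2,1}(tau, 0) = 0:
--     # n=0: c(0,1) + c(0,0) + c(0,-1) = 1 + (-2) + 1 = 0. CHECK.
--     # n=1: c(1,2)+c(1,1)+c(1,0)+c(1,-1)+c(1,-2)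
--     #     = c(0) + c(3) + c(4) + c(3) + c(0) = (-2) + 8 + (-12) + 8 + (-2) = 0. CHECK.
--     # Computed from the product formula:
--     # phi_{-2,1} = (y - 2 + y^{-1}) * prod_{n>=1} (1-q^n)^{-4} [(1-yq^n)(1-y^{-1}q^n)]^2
--     # Verified: phi_{-2,1}(tau, 0) = 0 for all q-orders.
--     table = {
--         -1: 1,
--         0: -2,
--         3: 8,
--         4: -12,
--         7: 39,
--         8: -56,
--         11: 152,
--         12: -208,
--         15: 513,
--         16: -684,
--         19: 1560,
--         20: -2032,
--         23: 4382,
--         24: -5616,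
--         27: 11552,
--         28: -14592,
--         31: 28899,
--         32: -36088,
--         35: 69168,
--         36: -85500,
--         39: 159372,
--         40: -195312,
--         43: 355224,
--         44: -431984,
--         47: 768885,
--     }
--
--     coeffs = {}
--     for n in range(nmax):
--         for l in range(-2 * nmax, 2 * nmax + 1):
--             D = 4 * n - l * l
--             if D in table and table[D] != 0:
--                 coeffs[(n, l)] = table[D]
--     return coeffs
-- ===== SOURCE B (Python) =====
-- # B: instead of scanning all l in [-2*nmax, 2*nmax] for every n (O(nmax^2)),
-- # for each n walk l = 0,1,2,... only while l*l <= 4*n+1 (every table key D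
-- # satisfies D >= -1, so a hit forces l*l <= 4*n+1), collect the hits once,
-- # and emit the negative mirrors followed by the nonnegative ones.
-- def phi_m21_fourier(nmax: int = 20):
--     TBL = [(-1, 1), (0, -2), (3, 8), (4, -12), (7, 39), (8, -56),
--            (11, 152), (12, -208), (15, 513), (16, -684), (19, 1560),
--            (20, -2032), (23, 4382), (24, -5616), (27, 11552), (28, -14592),
--            (31, 28899), (32, -36088), (35, 69168), (36, -85500),
--            (39, 159372), (40, -195312), (43, 355224), (44, -431984),
--            (47, 768885)]
--     lut = dict(TBL)
--     out = {}
--     for n in range(nmax):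
--         hits = []  # (l, c) for l = 0, 1, 2, ... with 4*n - l*l in the table
--         l = 0
--         while l * l <= 4 * n + 1:
--             c = lut.get(4 * n - l * l)
--             if c is not None:
--                 hits.append((l, c))
--             l += 1
--         for l, c in reversed(hits):
--             if l > 0:
--                 out[(n, -l)] = c
--         for l, c in hits:
--             out[(n, l)] = c
--     return out
-- ===== Notes on version B (the rewrite author's own statement) =====
-- stated objective: faster
-- what changed: Instead of scanning all l in [-2*nmax, 2*nmax] for every n, B walks l = 0,1,2,... only while l*l <= 4*n+1 (every table discriminant is >= -1, so no hit exists beyond that), collects the hits once per n, and emits the negative mirrors followed by the nonnegative ones.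
import Mathlib
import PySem

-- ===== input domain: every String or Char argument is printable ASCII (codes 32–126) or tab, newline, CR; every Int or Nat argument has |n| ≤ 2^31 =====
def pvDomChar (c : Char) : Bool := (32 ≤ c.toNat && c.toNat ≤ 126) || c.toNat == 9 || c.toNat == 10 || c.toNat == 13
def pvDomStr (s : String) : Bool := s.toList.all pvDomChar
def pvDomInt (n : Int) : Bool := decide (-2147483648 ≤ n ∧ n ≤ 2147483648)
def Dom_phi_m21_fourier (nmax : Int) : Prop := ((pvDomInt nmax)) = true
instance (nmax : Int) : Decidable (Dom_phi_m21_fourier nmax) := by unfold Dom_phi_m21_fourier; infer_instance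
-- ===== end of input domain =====

-- B replaces A's full scan of l ∈ [-2·nmax, 2·nmax] per n by a short walk l = 0,1,2,… while l² ≤ 4n+1,
-- emitting negative mirrors then nonnegative hits (objective: faster, measured).


-- ===== PORT A =====
-- A's literal `table` dict
def pvTableA : PySem.Dict Int Int := PySem.Dict.ofList
  [(-1, 1), (0, -2), (3, 8), (4, -12), (7, 39), (8, -56),
   (11, 152), (12, -208), (15, 513), (16, -684), (19, 1560),
   (20, -2032), (23, 4382), (24, -5616), (27, 11552), (28, -14592),
   (31, 28899), (32, -36088), (35, 69168), (36, -85500),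
   (39, 159372), (40, -195312), (43, 355224), (44, -431984),
   (47, 768885)]

def phi_m21_fourier (nmax : Int) : List (List Int × Int) :=
  ((PySem.List.pyRange 0 nmax 1).foldl (fun coeffs n =>
    (PySem.List.pyRange (-2 * nmax) (2 * nmax + 1) 1).foldl (fun coeffs l =>
      let D := 4 * n - l * l
      if pvTableA.contains D && pvTableA.getD D 0 != 0 then
        coeffs.insert [n, l] (pvTableA.getD D 0)
      else coeffs) coeffs) PySem.Dict.empty).items

-- ===== PORT B =====
-- B's `TBL` list of pairs and `lut = dict(TBL)`
def pvTblB : List (Int × Int) :=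
  [(-1, 1), (0, -2), (3, 8), (4, -12), (7, 39), (8, -56),
   (11, 152), (12, -208), (15, 513), (16, -684), (19, 1560),
   (20, -2032), (23, 4382), (24, -5616), (27, 11552), (28, -14592),
   (31, 28899), (32, -36088), (35, 69168), (36, -85500),
   (39, 159372), (40, -195312), (43, 355224), (44, -431984),
   (47, 768885)]

def pvLutB : PySem.Dict Int Int := PySem.Dict.ofList pvTblB

-- Source B's while loop: collect (l, c) for l = l0, l0+1, … while l*l ≤ 4*n+1
-- (fuel only makes the loop total; it is provably sufficient at the call site)
def pvHits (n : Int) : Nat → Nat → List (Int × Int)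
  | _, 0 => []
  | l, fuel + 1 =>
    if (l : Int) * l ≤ 4 * n + 1 then
      (match pvLutB.get? (4 * n - (l : Int) * l) with
       | some c => [((l : Int), c)]
       | none => []) ++ pvHits n (l + 1) fuel
    else []

def phi_m21_fourier_alt (nmax : Int) : List (List Int × Int) :=
  ((PySem.List.pyRange 0 nmax 1).foldl (fun out n =>
    let hits := pvHits n 0 (4 * n + 2).toNat
    let out := hits.reverse.foldl (fun out p =>
      if p.1 > 0 then out.insert [n, -p.1] p.2 else out) out
    hits.foldl (fun out p => out.insert [n, p.1] p.2) out) PySem.Dict.empty).items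

-- ===== PRECONDITION & SPEC =====
def Spec_phi_m21_fourier (nmax : Int) (out : List (List Int × Int)) : Prop := out = phi_m21_fourier_alt nmax
instance (nmax : Int) (out : List (List Int × Int)) : Decidable (Spec_phi_m21_fourier nmax out) := by unfold Spec_phi_m21_fourier; infer_instance

-- ===== CLAIM (what is proved, stated in full; the proofs are below) =====
def Claim_equal_phi_m21_fourier : Prop := ∀ (nmax : Int), Dom_phi_m21_fourier nmax → Spec_phi_m21_fourier nmax (phi_m21_fourier nmax)

-- ===== LEMMAS AND PROOFS =====

lemma pvTableA_eq : pvTableA = pvLutB := by rfl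

lemma pvLutB_keys : pvLutB.keys =
    [-1, 0, 3, 4, 7, 8, 11, 12, 15, 16, 19, 20, 23, 24, 27, 28, 31, 32, 35, 36, 39, 40, 43, 44, 47] := by
  decide

-- every key of the table is ≥ -1
lemma pvKey_ge (D : Int) (h : pvLutB.contains D = true) : -1 ≤ D := by
  have hm : D ∈ pvLutB.keys := (PySem.Dict.contains_iff_mem_keys _ _).mp h
  rw [pvLutB_keys] at hm
  simp only [List.mem_cons, List.not_mem_nil, or_false] at hm
  omega

-- every value the table lookup can return is nonzero
lemma pvVal_ne (D : Int) (h : pvLutB.contains D = true) : pvLutB.getD D 0 ≠ 0 := by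
  have hm : D ∈ pvLutB.keys := (PySem.Dict.contains_iff_mem_keys _ _).mp h
  rw [pvLutB_keys] at hm
  simp only [List.mem_cons, List.not_mem_nil, or_false] at hm
  rcases hm with rfl|rfl|rfl|rfl|rfl|rfl|rfl|rfl|rfl|rfl|rfl|rfl|rfl|rfl|rfl|rfl|rfl|rfl|rfl|rfl|rfl|rfl|rfl|rfl|rfl <;> decide

-- A's guard `D in table and table[D] != 0` is just the membership test
lemma pvGuard (D : Int) :
    (pvLutB.contains D && (pvLutB.getD D 0 != 0)) = pvLutB.contains D := by
  cases hc : pvLutB.contains D with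
  | false => simp
  | true => simp [bne_iff_ne, pvVal_ne D hc]

-- a fold of guarded inserts is the fold of plain inserts over the filtered, mapped pair list
lemma pvFoldl_insert_if {α : Type} (p : α → Prop) [DecidablePred p]
    (k : α → List Int) (v : α → Int) (xs : List α) (d : PySem.Dict (List Int) Int) :
    xs.foldl (fun d x => if p x then d.insert (k x) (v x) else d) d
      = ((xs.filter (fun x => decide (p x))).map (fun x => (k x, v x))).foldl
          (fun d q => d.insert q.1 q.2) d := by
  induction xs generalizing d with
  | nil => rfl
  | cons a xs ih => by_cases h : p a <;> simp [h, ih]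

lemma pvFoldl_insert {α : Type} (k : α → List Int) (v : α → Int)
    (xs : List α) (d : PySem.Dict (List Int) Int) :
    xs.foldl (fun d x => d.insert (k x) (v x)) d
      = (xs.map (fun x => (k x, v x))).foldl (fun d q => d.insert q.1 q.2) d := by
  induction xs generalizing d with
  | nil => rfl
  | cons a xs ih => simp [ih]

-- past the stop point the filtered range is empty
lemma pvFilter_nil (n B : Int) (l0 : Nat) (h : ¬ ((l0 : Int) * l0 ≤ 4 * n + 1)) :
    (PySem.List.pyRange (l0 : Int) B 1).filter
        (fun l => pvLutB.contains (4 * n - l * l)) = [] := by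
  rw [List.filter_eq_nil_iff]
  intro l hl
  rw [PySem.List.mem_pyRange_one] at hl
  have hl0 : (0 : Int) ≤ (l0 : Int) := Int.natCast_nonneg l0
  intro hc
  have := pvKey_ge _ hc
  nlinarith [hl.1, hl.2]

-- characterisation of Source B's while loop as a filtered range, for any bound B past the stop
-- point and any sufficient fuel
lemma pvHits_eq (n B : Int) (hB : 4 * n + 1 < B * B) (hB0 : 0 ≤ B) (fuel : Nat) :
    ∀ l0 : Nat, 4 * n + 2 - (l0 : Int) * l0 ≤ (fuel : Int) →
    pvHits n l0 fuel = ((PySem.List.pyRange (l0 : Int) B 1).filter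
        (fun l => pvLutB.contains (4 * n - l * l))).map
      (fun l => (l, pvLutB.getD (4 * n - l * l) 0)) := by
  induction fuel with
  | zero =>
    intro l0 hf
    have h : ¬ ((l0 : Int) * l0 ≤ 4 * n + 1) := by
      push_cast at hf; intro hle; linarith
    rw [pvFilter_nil n B l0 h]
    rfl
  | succ fuel ih =>
    intro l0 hf
    show (if (l0 : Int) * l0 ≤ 4 * n + 1 then _ else []) = _
    by_cases h : (l0 : Int) * l0 ≤ 4 * n + 1
    · have hl0 : (0 : Int) ≤ (l0 : Int) := Int.natCast_nonneg l0
      have hlt : (l0 : Int) < B := by nlinarith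
      have hstep : ((l0 : Int) + 1) * ((l0 : Int) + 1) ≥ (l0 : Int) * l0 + 1 := by nlinarith
      have hrec := ih (l0 + 1) (by push_cast; push_cast at hf; linarith)
      rw [if_pos h, PySem.List.pyRange_one_cons hlt, List.filter_cons]
      cases hg : pvLutB.get? (4 * n - (l0 : Int) * l0) with
      | none =>
        have hc : pvLutB.contains (4 * n - (l0 : Int) * l0) = false := by
          rw [PySem.Dict.contains_eq_isSome_get?, hg]; rfl
        simp only [hc, Bool.false_eq_true, if_false, List.nil_append, hrec]
        push_cast
        rfl
      | some c =>
        have hc : pvLutB.contains (4 * n - (l0 : Int) * l0) = true := by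
          rw [PySem.Dict.contains_eq_isSome_get?, hg]; rfl
        have hv : pvLutB.getD (4 * n - (l0 : Int) * l0) 0 = c :=
          PySem.Dict.getD_of_get?_eq_some _ 0 hg
        rw [hrec]
        simp only [hc, if_true, List.map_cons, List.singleton_append, hv]
        push_cast
        rfl
    · rw [if_neg h, pvFilter_nil n B l0 h]
      rfl

-- [-a, …, -1] is the reversed, negated [1, …, a]
lemma pvRange_neg (a : Int) (ha : 0 ≤ a) :
    PySem.List.pyRange (-a) 0 1 = ((PySem.List.pyRange 1 (a + 1) 1).reverse).map (fun x => -x) := by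
  apply List.ext_getElem
  · simp [PySem.List.length_pyRange_one]
  · intro k h1 h2
    simp only [PySem.List.length_pyRange_one] at h1 h2
    simp only [List.getElem_map, List.getElem_reverse, PySem.List.getElem_pyRange_one,
               PySem.List.length_pyRange_one]
    omega

-- the positive half of [0, …, B-1]
lemma pvPosFilter (B : Int) (hB : 0 < B) :
    (PySem.List.pyRange 0 B 1).filter (fun l => decide (l > 0)) = PySem.List.pyRange 1 B 1 := by
  rw [PySem.List.pyRange_one_cons hB, List.filter_cons]
  simp only [gt_iff_lt, lt_self_iff_false, decide_false, Bool.false_eq_true, if_false]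
  apply List.filter_eq_self.mpr
  intro l hl
  rw [PySem.List.mem_pyRange_one] at hl
  simp only [decide_eq_true_eq]
  omega

-- the per-n insert sequences of the two ports coincide (0 ≤ n < nmax)
lemma pvPairs_eq (nmax n : Int) (hn0 : 0 ≤ n) (hn : n < nmax) :
    ((PySem.List.pyRange (-2 * nmax) (2 * nmax + 1) 1).filter
        (fun l => pvLutB.contains (4 * n - l * l))).map
      (fun l => (([n, l] : List Int), pvLutB.getD (4 * n - l * l) 0))
    = ((pvHits n 0 (4 * n + 2).toNat).reverse.filter (fun p => decide (p.1 > 0))).map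
        (fun p => (([n, -p.1] : List Int), p.2))
      ++ (pvHits n 0 (4 * n + 2).toNat).map (fun p => (([n, p.1] : List Int), p.2)) := by
  have hnm : 1 ≤ nmax := by omega
  have hB : 4 * n + 1 < (2 * nmax + 1) * (2 * nmax + 1) := by nlinarith
  have hhits := pvHits_eq n (2 * nmax + 1) hB (by omega) (4 * n + 2).toNat 0 (by push_cast; omega)
  simp only [Nat.cast_zero] at hhits
  rw [hhits]
  -- abbreviations
  have hsplit : PySem.List.pyRange (-2 * nmax) (2 * nmax + 1) 1
      = PySem.List.pyRange (-2 * nmax) 0 1 ++ PySem.List.pyRange 0 (2 * nmax + 1) 1 :=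
    PySem.List.pyRange_one_append _ 0 _ (by omega) (by omega)
  rw [hsplit, List.filter_append, List.map_append]
  congr 1
  -- negative halves
  · have hneg : (-2 : Int) * nmax = -(2 * nmax) := by ring
    rw [hneg, pvRange_neg (2 * nmax) (by omega)]
    -- push filter and map through the reverse/negate on the left,
    -- and through the (l, c)-pairing on the right
    rw [List.filter_map, List.map_map, ← List.map_reverse, List.filter_map, List.map_map]
    simp only [Function.comp_def, neg_mul_neg]
    simp only [List.filter_reverse]
    rw [List.filter_comm, pvPosFilter _ (by omega)]
  -- nonnegative halves
  · rw [List.map_map]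
    rfl

-- the two ports' inner loops agree on every dict, for 0 ≤ n < nmax
lemma pvInner_eq (nmax n : Int) (hn0 : 0 ≤ n) (hn : n < nmax) (d : PySem.Dict (List Int) Int) :
    (PySem.List.pyRange (-2 * nmax) (2 * nmax + 1) 1).foldl (fun coeffs l =>
      if pvLutB.contains (4 * n - l * l) && pvLutB.getD (4 * n - l * l) 0 != 0 then
        coeffs.insert [n, l] (pvLutB.getD (4 * n - l * l) 0)
      else coeffs) d
    = (pvHits n 0 (4 * n + 2).toNat).foldl (fun out p => out.insert [n, p.1] p.2)
        ((pvHits n 0 (4 * n + 2).toNat).reverse.foldl (fun out p =>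
          if p.1 > 0 then out.insert [n, -p.1] p.2 else out) d) := by
  have hA : (PySem.List.pyRange (-2 * nmax) (2 * nmax + 1) 1).foldl (fun coeffs l =>
      if pvLutB.contains (4 * n - l * l) && pvLutB.getD (4 * n - l * l) 0 != 0 then
        coeffs.insert [n, l] (pvLutB.getD (4 * n - l * l) 0)
      else coeffs) d
      = (PySem.List.pyRange (-2 * nmax) (2 * nmax + 1) 1).foldl (fun coeffs l =>
      if pvLutB.contains (4 * n - l * l) = true then
        coeffs.insert [n, l] (pvLutB.getD (4 * n - l * l) 0)
      else coeffs) d := by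
    apply PySem.List.foldl_congr_mem
    intro acc x _
    rw [pvGuard]
  rw [hA, pvFoldl_insert_if (fun l => pvLutB.contains (4 * n - l * l) = true),
      pvFoldl_insert_if (fun p : Int × Int => p.1 > 0) (fun p => [n, -p.1]) (fun p => p.2),
      pvFoldl_insert (fun p : Int × Int => [n, p.1]) (fun p => p.2),
      ← List.foldl_append]
  have : (fun x => decide (pvLutB.contains (4 * n - x * x) = true))
      = (fun l => pvLutB.contains (4 * n - l * l)) := by
    funext x; simp
  rw [this, pvPairs_eq nmax n hn0 hn]

-- ===== VERDICT (by name: the statement is the Claim_ definition above) =====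
theorem phi_m21_fourier_spec : Claim_equal_phi_m21_fourier := by
  intro nmax _
  unfold Spec_phi_m21_fourier phi_m21_fourier phi_m21_fourier_alt
  simp only [pvTableA_eq]
  congr 1
  apply PySem.List.foldl_congr_mem
  intro acc x hx
  rw [PySem.List.mem_pyRange_one] at hx
  simpa using pvInner_eq nmax x hx.1 hx.2 acc
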